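-- pv_equiv track=rewrite | github.com/lolfig/cuban_fx_app | framework_analytics/analytics_utils.py | find_marginal_price
-- ===== SOURCE A (Python) =====
-- def find_marginal_price(cp, dl, vp, ol):
--         price = 0
--         vol = 0
--
--         for idxc in range(len(cp)):
--             if idxc >= len(vp):
--                 break
--
--             if cp[idxc] >= vp[idxc]:
--                 if dl[idxc] > ol[idxc]:
--                     price = vp[idxc]
--                     vol = ol[idxc]
--                 else:
--                     price = vp[idxc]
--                     vol = dl[idxc]
--             else:
--                 break
--
--         return price, vol
-- ===== SOURCE B (Python) =====
-- def find_marginal_price(cp, dl, vp, ol):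
--     # Collect every index in the comparable prefix where the validity test fails,
--     # then the boundary n is the least failing index (or m if none fails).
--     m = min(len(cp), len(vp))
--     bad = [i for i in range(m) if cp[i] < vp[i]]
--     n = min(bad, default=m)
--     if n == 0:
--         return 0, 0
--     i = n - 1
--     return vp[i], (ol[i] if dl[i] > ol[i] else dl[i])
-- ===== Notes on version B (the rewrite author's own statement) =====
-- stated objective: alternative
-- what changed: B abandons A's early-exit accumulator loop: it does a complete pass over the comparable prefix collecting every failing index, takes the minimum of that set (default m) as the boundary n, and computes price/vol once from index n-1 (or (0,0) when n==0).
import Mathlib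
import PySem

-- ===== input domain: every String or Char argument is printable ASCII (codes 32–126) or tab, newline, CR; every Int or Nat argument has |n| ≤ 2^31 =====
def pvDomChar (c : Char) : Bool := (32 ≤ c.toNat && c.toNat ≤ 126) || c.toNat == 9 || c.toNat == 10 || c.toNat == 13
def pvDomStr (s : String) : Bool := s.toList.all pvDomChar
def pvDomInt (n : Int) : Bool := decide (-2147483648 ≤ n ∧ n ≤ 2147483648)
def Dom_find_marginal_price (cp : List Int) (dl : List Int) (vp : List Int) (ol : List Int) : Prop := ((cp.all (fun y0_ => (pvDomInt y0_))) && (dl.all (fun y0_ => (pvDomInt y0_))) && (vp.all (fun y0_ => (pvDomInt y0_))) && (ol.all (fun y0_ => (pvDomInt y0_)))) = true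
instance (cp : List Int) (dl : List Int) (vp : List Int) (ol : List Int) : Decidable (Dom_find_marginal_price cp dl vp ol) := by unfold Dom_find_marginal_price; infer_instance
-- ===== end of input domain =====

-- B replaces A's early-exit accumulator loop by a full pass that collects all failing
-- indices, takes their minimum as the boundary, and computes the answer once (alternative; same cost).

-- Indexing helper shared by both ports: Python xs[i] for a nonnegative in-range i.
-- The default 0 is unreachable on the indices Pre_find_marginal_price admits.
def pvGet (xs : List Int) (i : Nat) : Int := xs.getD i 0

-- ===== PORT A =====
-- the 'for idxc in range(len(cp))' loop; fuel counts the remaining range elements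
def loopA (cp : List Int) (dl : List Int) (vp : List Int) (ol : List Int) :
    Nat → Nat → Int × Int → Int × Int
  | _, 0, s => s
  | idxc, fuel+1, (price, vol) =>
    if vp.length ≤ idxc then (price, vol)                 -- if idxc >= len(vp): break
    else if pvGet vp idxc ≤ pvGet cp idxc then            -- if cp[idxc] >= vp[idxc]
      if pvGet ol idxc < pvGet dl idxc then               -- if dl[idxc] > ol[idxc]
        loopA cp dl vp ol (idxc+1) fuel (pvGet vp idxc, pvGet ol idxc)
      else
        loopA cp dl vp ol (idxc+1) fuel (pvGet vp idxc, pvGet dl idxc)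
    else (price, vol)                                      -- else: break

def find_marginal_price (cp : List Int) (dl : List Int) (vp : List Int) (ol : List Int) : Int × Int :=
  loopA cp dl vp ol 0 cp.length (0, 0)

-- ===== PORT B =====
-- bad = [i for i in range(m) if cp[i] < vp[i]]; n = min(bad, default=m)
def find_marginal_price_alt (cp : List Int) (dl : List Int) (vp : List Int) (ol : List Int) : Int × Int :=
  let m := min cp.length vp.length
  let bad := (List.range m).filter (fun i => pvGet cp i < pvGet vp i)
  let n := bad.min?.getD m
  if n = 0 then (0, 0)
  else
    let i := n - 1
    (pvGet vp i, if pvGet ol i < pvGet dl i then pvGet ol i else pvGet dl i)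

-- ===== PRECONDITION & SPEC =====
-- Pre_ excludes exactly the inputs where Python A raises IndexError: some index i of the
-- consecutively-valid cp/vp prefix is out of range for dl or ol (B raises there too).
def Pre_find_marginal_price (cp : List Int) (dl : List Int) (vp : List Int) (ol : List Int) : Prop :=
  ∀ i : Nat, i < min cp.length vp.length →
    (∀ j : Nat, j ≤ i → pvGet vp j ≤ pvGet cp j) →
    i < dl.length ∧ i < ol.length

instance (cp : List Int) (dl : List Int) (vp : List Int) (ol : List Int) : Decidable (Pre_find_marginal_price cp dl vp ol) := by unfold Pre_find_marginal_price; infer_instance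

def pvWitness_find_marginal_price : List Int × List Int × List Int × List Int :=
  ([5, 2], [3, 9], [4, 7], [2, 8])

def Spec_find_marginal_price (cp : List Int) (dl : List Int) (vp : List Int) (ol : List Int) (out : Int × Int) : Prop := out = find_marginal_price_alt cp dl vp ol
instance (cp : List Int) (dl : List Int) (vp : List Int) (ol : List Int) (out : Int × Int) : Decidable (Spec_find_marginal_price cp dl vp ol out) := by unfold Spec_find_marginal_price; infer_instance

-- ===== CLAIM (what is proved, stated in full; the proofs are below) =====
def Claim_equal_find_marginal_price : Prop := ∀ (cp : List Int) (dl : List Int) (vp : List Int) (ol : List Int), Dom_find_marginal_price cp dl vp ol → Pre_find_marginal_price cp dl vp ol → Spec_find_marginal_price cp dl vp ol (find_marginal_price cp dl vp ol)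

-- ===== LEMMAS AND PROOFS =====

-- proof-only helper: the first index ≥ n (within fuel) failing vp ≤ cp
def scanB (cp : List Int) (vp : List Int) : Nat → Nat → Nat
  | n, 0 => n
  | n, fuel+1 => if pvGet vp n ≤ pvGet cp n then scanB cp vp (n+1) fuel else n

theorem scanB_ge (cp vp : List Int) : ∀ fuel n, n ≤ scanB cp vp n fuel := by
  intro fuel
  induction fuel with
  | zero => intro n; simp [scanB]
  | succ f ih =>
    intro n
    simp only [scanB]
    split
    · exact le_trans (Nat.le_succ n) (ih (n+1))
    · exact le_refl n

theorem loopA_eq (cp dl vp ol : List Int) :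
    ∀ fuel n s, loopA cp dl vp ol n fuel s =
      (let k := scanB cp vp n (min fuel (vp.length - n));
       if k = n then s
       else (pvGet vp (k-1),
             if pvGet ol (k-1) < pvGet dl (k-1) then pvGet ol (k-1) else pvGet dl (k-1))) := by
  intro fuel
  induction fuel with
  | zero =>
    intro n s
    simp [loopA, scanB]
  | succ f ih =>
    intro n s
    obtain ⟨price, vol⟩ := s
    by_cases hv : vp.length ≤ n
    · have h0 : vp.length - n = 0 := Nat.sub_eq_zero_of_le hv
      simp [loopA, scanB, hv, h0]
    · push_neg at hv
      have hx : min (f+1) (vp.length - n) = min f (vp.length - (n+1)) + 1 := by omega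
      by_cases hc : pvGet vp n ≤ pvGet cp n
      · have hstep : scanB cp vp n (min (f+1) (vp.length - n))
            = scanB cp vp (n+1) (min f (vp.length - (n+1))) := by
          rw [hx]; simp [scanB, hc]
        have hge : n + 1 ≤ scanB cp vp (n+1) (min f (vp.length - (n+1))) :=
          scanB_ge cp vp _ _
        by_cases hd : pvGet ol n < pvGet dl n
        · simp only [loopA, if_neg (not_le.mpr hv), if_pos hc, if_pos hd]
          rw [ih (n+1) (pvGet vp n, pvGet ol n), hstep]
          simp only []
          set k := scanB cp vp (n+1) (min f (vp.length - (n+1))) with hk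
          have hkn : k ≠ n := by omega
          by_cases hk1 : k = n + 1
          · simp [hk1, hd]
          · simp [hk1, hkn]
        · simp only [loopA, if_neg (not_le.mpr hv), if_pos hc, if_neg hd]
          rw [ih (n+1) (pvGet vp n, pvGet dl n), hstep]
          simp only []
          set k := scanB cp vp (n+1) (min f (vp.length - (n+1))) with hk
          have hkn : k ≠ n := by omega
          by_cases hk1 : k = n + 1
          · simp [hk1, hd]
          · simp [hk1, hkn]
      · have h1 : 0 < min (f+1) (vp.length - n) := by omega
        obtain ⟨f', hf'⟩ : ∃ f', min (f+1) (vp.length - n) = f' + 1 :=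
          ⟨min (f+1) (vp.length - n) - 1, by omega⟩
        simp [loopA, scanB, hc, hf']

-- scanB starting at n with fuel f finds the least failing index in range' n f (or n+f)
theorem scanB_eq_min (cp vp : List Int) :
    ∀ f n, scanB cp vp n f =
      (((List.range' n f).filter (fun i => decide (pvGet cp i < pvGet vp i))).min?).getD (n + f) := by
  intro f
  induction f with
  | zero => intro n; simp [scanB]
  | succ f ih =>
    intro n
    by_cases hc : pvGet vp n ≤ pvGet cp n
    · have hnp : ¬ pvGet cp n < pvGet vp n := not_lt.mpr hc
      simp only [scanB, if_pos hc, List.range'_succ, List.filter_cons, hnp, decide_false]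
      rw [ih (n+1)]
      norm_num
      ring_nf
    · have hp : pvGet cp n < pvGet vp n := not_le.mp hc
      simp only [scanB, if_neg hc, List.range'_succ, List.filter_cons, hp, decide_true, if_true]
      cases hm : ((List.range' (n+1) f).filter (fun i => decide (pvGet cp i < pvGet vp i))).min? with
      | none => simp [List.min?_cons, hm]
      | some a =>
        have ha : a ∈ (List.range' (n+1) f).filter (fun i => decide (pvGet cp i < pvGet vp i)) :=
          List.min?_mem hm
        have hge : n + 1 ≤ a := (List.mem_range'_1.mp (List.mem_of_mem_filter ha)).1
        simp [List.min?_cons, hm, Nat.min_eq_left (by omega : n ≤ a)]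

-- ===== VERDICT (by name: the statement is the Claim_ definition above) =====
theorem find_marginal_price_spec : Claim_equal_find_marginal_price := by
  intro cp dl vp ol _hDom _hPre
  unfold Spec_find_marginal_price find_marginal_price find_marginal_price_alt
  rw [loopA_eq]
  have h : scanB cp vp 0 (min cp.length (vp.length - 0))
      = (((List.range (min cp.length vp.length)).filter
            (fun i => decide (pvGet cp i < pvGet vp i))).min?).getD (min cp.length vp.length) := by
    rw [scanB_eq_min, List.range_eq_range']
    norm_num
  simp only [h]
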